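-- pv_equiv track=rewrite | github.com/fedorareis/Advent-of-Code | 2023/day11/part2/main.py | expandCol
-- ===== SOURCE A (Python) =====
-- def replacer(s, newstring, index, nofail=False):
--     # raise an error if index is outside of the string
--     if not nofail and index not in range(len(s)):
--         raise ValueError("index outside given string")
--
--     # if not erroring, but the index is still not in the correct range..
--     if index < 0:  # add it to the beginning
--         return newstring + s
--     if index > len(s):  # add it to the end
--         return s + newstring
--
--     # insert the new string between "slices" of the original
--     return s[:index] + newstring + s[index + 1:]
--
-- def expandCol(universe):
--     for idx in reversed(range(len(universe[0]))):
--         empty = True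
--         for row in universe:
--             if not (row[idx] == "." or row[idx] == "*"):
--                 empty = False
--
--         if empty:
--             for id2, row in enumerate(universe):
--                 universe[id2] = replacer(row, "*", idx)
--
--     return universe
-- ===== SOURCE B (Python) =====
-- def expandCol(universe):
--     # Equivalence is about the return value; like A, this mutates `universe` in place.
--     width = len(universe[0])
--     empty_cols = [idx for idx in range(width)
--                   if all(row[idx] == "." or row[idx] == "*" for row in universe)]
--     for id2, row in enumerate(universe):
--         universe[id2] = "".join("*" if i in empty_cols else ch
--                                 for i, ch in enumerate(row))
--     return universe
-- ===== Notes on version B (the rewrite author's own statement) =====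
-- stated objective: alternative
-- what changed: B computes the set of empty columns once in a single pass and rebuilds every row exactly once, instead of A's reversed per-column scan that rewrites the whole grid for each empty column found.
import Mathlib
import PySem

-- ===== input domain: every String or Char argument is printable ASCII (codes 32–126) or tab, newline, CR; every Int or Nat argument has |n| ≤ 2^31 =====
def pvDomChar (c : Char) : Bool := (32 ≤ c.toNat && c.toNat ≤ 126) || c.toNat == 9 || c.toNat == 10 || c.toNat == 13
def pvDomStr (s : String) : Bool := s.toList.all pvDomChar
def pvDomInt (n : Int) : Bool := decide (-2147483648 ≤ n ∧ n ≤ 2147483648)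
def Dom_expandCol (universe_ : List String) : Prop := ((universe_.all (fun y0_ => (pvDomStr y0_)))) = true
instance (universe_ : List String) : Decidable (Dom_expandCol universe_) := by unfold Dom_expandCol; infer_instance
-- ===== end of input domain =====

-- B rebuilds each row once from a precomputed list of empty columns instead of A's
-- per-empty-column full-grid rewrite (objective: alternative decomposition; both mutate
-- the Python list in place, the claim here is about the returned value).

-- ===== PORT A =====
-- A's `replacer` (nofail=False); the ValueError branch (index outside the string) is
-- excluded by Pre_expandCol, the remaining branches are transliterated in order.
def pvReplacer (s : String) (newstring : String) (index : Int) : String :=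
  if index < 0 then String.ofList (newstring.toList ++ s.toList)
  else if index > (s.toList.length : Int) then String.ofList (s.toList ++ newstring.toList)
  else String.ofList (PySem.List.slice s.toList none (some index) ++ newstring.toList ++
                  PySem.List.slice s.toList (some (index + 1)) none)

def expandCol (universe_ : List String) : List String :=
  (PySem.List.pyRange 0 ((universe_.headD "").toList.length : Int) 1).reverse.foldl
    (fun uni idx =>
      let empty := uni.foldl
        (fun empty row =>
          if !(PySem.List.pyGet? row.toList idx == some '.' ||
               PySem.List.pyGet? row.toList idx == some '*') then false
          else empty) true
      if empty then uni.map (fun row => pvReplacer row "*" idx) else uni)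
    universe_

-- ===== PORT B =====
-- the `all(row[idx] == "." or row[idx] == "*" for row in universe)` test of Source B
def pvColEmpty (universe_ : List String) (idx : Int) : Bool :=
  universe_.all (fun row =>
    PySem.List.pyGet? row.toList idx == some '.' ||
    PySem.List.pyGet? row.toList idx == some '*')

-- the `''.join('*' if i in empty_cols else ch for i, ch in enumerate(row))` of Source B
def pvRestar (emptyCols : List Int) (row : String) : String :=
  String.ofList ((PySem.List.enumerate row.toList 0).map
    (fun p => if p.1 ∈ emptyCols then '*' else p.2))

def expandCol_alt (universe_ : List String) : List String :=
  let width : Int := ((universe_.headD "").toList.length : Int)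
  let emptyCols := (PySem.List.pyRange 0 width 1).filter (pvColEmpty universe_)
  universe_.map (pvRestar emptyCols)

-- ===== PRECONDITION & SPEC =====
-- Pre_ excludes exactly the inputs where Python A raises IndexError: the empty list
-- (universe[0]) and grids with a row shorter than the first row (row[idx]).
def Pre_expandCol (universe_ : List String) : Prop :=
  universe_ ≠ [] ∧ ∀ row ∈ universe_, (universe_.headD "").toList.length ≤ row.toList.length
instance (universe_ : List String) : Decidable (Pre_expandCol universe_) := by
  unfold Pre_expandCol; infer_instance
def pvWitness_expandCol : List String := ["#.", ".."]

def Spec_expandCol (universe_ : List String) (out : List String) : Prop := out = expandCol_alt universe_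
instance (universe_ : List String) (out : List String) : Decidable (Spec_expandCol universe_ out) := by unfold Spec_expandCol; infer_instance

-- ===== CLAIM (what is proved, stated in full; the proofs are below) =====
def Claim_equal_expandCol : Prop := ∀ (universe_ : List String), Dom_expandCol universe_ → Pre_expandCol universe_ → Spec_expandCol universe_ (expandCol universe_)

-- ===== LEMMAS AND PROOFS =====

-- A's inner flag loop is `all`
theorem foldl_flag_eq_all (l : List String) (c : String → Bool) (b : Bool) :
    l.foldl (fun e row => if !(c row) then false else e) b = (b && l.all c) := by
  induction l generalizing b with
  | nil => simp
  | cons x xs ih =>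
      simp only [List.foldl_cons, List.all_cons, ih]
      cases hc : c x <;> cases b <;> simp

-- character-level view of pvRestar
theorem restar_getElem? (S : List Int) (r : List Char) (n : Nat) :
    ((PySem.List.enumerate r 0).map (fun p => if p.1 ∈ S then '*' else p.2))[n]? =
      (r[n]?).map (fun c => if ((n : Int)) ∈ S then '*' else c) := by
  simp [List.getElem?_map, PySem.List.getElem?_enumerate]
  cases r[n]? <;> simp

theorem restar_length (S : List Int) (r : List Char) :
    ((PySem.List.enumerate r 0).map (fun p => if p.1 ∈ S then '*' else p.2)).length = r.length := by
  simp [PySem.List.length_enumerate]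

-- pvRestar only depends on which columns are in S
theorem restar_congr (S T : List Int) (h : ∀ j, j ∈ S ↔ j ∈ T) (r : String) :
    pvRestar S r = pvRestar T r := by
  unfold pvRestar
  congr 1
  apply List.map_congr_left
  intro p _
  simp [h p.1]

-- the column test at idx ignores stars written at other columns
theorem colEmpty_restar (u : List String) (S : List Int) (idx : Int)
    (hidx : idx ∉ S) (h0 : 0 ≤ idx) :
    pvColEmpty (u.map (pvRestar S)) idx = pvColEmpty u idx := by
  unfold pvColEmpty pvRestar
  simp only [List.all_map]
  refine List.all_congr rfl (fun row => ?_)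
  simp only [Function.comp_apply, String.toList_ofList]
  obtain ⟨n, rfl⟩ := Int.eq_ofNat_of_zero_le h0
  rw [PySem.List.pyGet?_natCast, PySem.List.pyGet?_natCast, restar_getElem? S row.toList n]
  cases hr : row.toList[n]? with
  | none => simp
  | some c => simp [hidx]

-- replacing position idx in an already-restarred row = restarring with idx added
theorem replacer_restar (S : List Int) (idx : Int) (n : Nat) (hn : idx = (n : Int))
    (row : String) (hlen : n < row.toList.length) :
    pvReplacer (pvRestar S row) "*" idx = pvRestar (S ++ [idx]) row := by
  subst hn
  unfold pvReplacer pvRestar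
  simp only [String.toList_ofList]
  have hlen' := restar_length S row.toList
  rw [if_neg (by omega), if_neg (by omega)]
  have hc : ((n : Int) + 1) = (((n + 1 : Nat)) : Int) := by push_cast; ring
  rw [PySem.List.slice_to_natCast, hc, PySem.List.slice_from_natCast]
  have hset : (List.map (fun p => if p.1 ∈ S then '*' else p.2)
        (PySem.List.enumerate row.toList)).take n ++ '*' ::
      (List.map (fun p => if p.1 ∈ S then '*' else p.2)
        (PySem.List.enumerate row.toList)).drop (n + 1) =
      (List.map (fun p => if p.1 ∈ S then '*' else p.2)
        (PySem.List.enumerate row.toList)).set n '*' :=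
    Eq.symm (List.set_eq_take_cons_drop '*' (by omega))
  have hstr : "*".toList = ['*'] := by decide
  rw [hstr]
  simp only [List.append_assoc, List.singleton_append, hset]
  congr 1
  apply List.ext_getElem?
  intro k
  rw [List.getElem?_set, restar_getElem? (S ++ [(n : Int)]) row.toList k]
  by_cases hk : n = k
  · subst hk
    rw [if_pos rfl, if_pos (by omega)]
    rw [List.getElem?_eq_getElem hlen]
    simp
  · rw [if_neg hk, restar_getElem? S row.toList k]
    cases row.toList[k]? with
    | none => rfl
    | some c =>
        simp only [Option.map_some]
        have : ((k : Int)) ∈ S ++ [(n : Int)] ↔ ((k : Int)) ∈ S := by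
          simp only [List.mem_append, List.mem_singleton]
          constructor
          · rintro (h | h)
            · exact h
            · exact absurd (by exact_mod_cast h) (Ne.symm hk)
          · exact Or.inl
        by_cases hm : ((k : Int)) ∈ S
        · simp [hm, this.mpr hm]
        · have h2 : ((k : Int)) ∉ S ++ [(n : Int)] := fun h => hm (this.mp h)
          simp [hm, h2]

-- main loop invariant
theorem loop_invariant (u : List String) (L S : List Int)
    (hL : ∀ j ∈ L, 0 ≤ j ∧ j.toNat < (u.headD "").toList.length)
    (hLS : ∀ j ∈ L, j ∉ S)
    (hnd : L.Nodup)
    (hpre : ∀ row ∈ u, (u.headD "").toList.length ≤ row.toList.length) :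
    L.foldl
      (fun uni idx =>
        let empty := uni.foldl
          (fun empty row =>
            if !(PySem.List.pyGet? row.toList idx == some '.' ||
                 PySem.List.pyGet? row.toList idx == some '*') then false
            else empty) true
        if empty then uni.map (fun row => pvReplacer row "*" idx) else uni)
      (u.map (pvRestar S))
    = u.map (pvRestar (S ++ L.filter (pvColEmpty u))) := by
  induction L generalizing S with
  | nil => simp
  | cons idx L' ih =>
      obtain ⟨h0, hw⟩ := hL idx (by simp)
      have hidxS : idx ∉ S := hLS idx (by simp)
      have hemp : ((u.map (pvRestar S)).all (fun row =>
          PySem.List.pyGet? row.toList idx == some '.' ||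
          PySem.List.pyGet? row.toList idx == some '*')) = pvColEmpty u idx :=
        colEmpty_restar u S idx hidxS h0
      simp only [List.foldl_cons, foldl_flag_eq_all, Bool.true_and, hemp]
      cases hce : pvColEmpty u idx with
      | false =>
          rw [if_neg (by simp), List.filter_cons_of_neg (by simp [hce])]
          have := ih S (fun j hj => hL j (List.mem_cons_of_mem _ hj))
            (fun j hj => hLS j (List.mem_cons_of_mem _ hj)) hnd.of_cons
          simp only [foldl_flag_eq_all, Bool.true_and] at this
          exact this
      | true =>
          rw [if_pos rfl, List.filter_cons_of_pos (by simp [hce])]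
          have hstep : (u.map (pvRestar S)).map (fun row => pvReplacer row "*" idx) =
              u.map (pvRestar (S ++ [idx])) := by
            rw [List.map_map]
            apply List.map_congr_left
            intro row hrow
            exact replacer_restar S idx idx.toNat (by omega) row
              (by have := hpre row hrow; omega)
          rw [hstep]
          have hnotin : idx ∉ L' := (List.nodup_cons.mp hnd).1
          have := ih (S ++ [idx]) (fun j hj => hL j (List.mem_cons_of_mem _ hj))
            (fun j hj => by
              simp only [List.mem_append, List.mem_singleton]
              rintro (h | rfl)
              · exact hLS j (List.mem_cons_of_mem _ hj) h
              · exact hnotin hj) hnd.of_cons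
          simp only [foldl_flag_eq_all, Bool.true_and] at this
          rw [this, List.append_assoc, List.singleton_append]

-- pvRestar with no empty columns is the identity
theorem restar_nil (row : String) : pvRestar [] row = row := by
  unfold pvRestar
  simp [PySem.List.map_snd_enumerate]

-- ===== VERDICT (by name: the statement is the Claim_ definition above) =====
theorem expandCol_spec : Claim_equal_expandCol := by
  intro u _ hpre
  obtain ⟨-, hrows⟩ := hpre
  unfold Spec_expandCol expandCol expandCol_alt
  set w := (u.headD "").toList.length with hw
  set p := pvColEmpty u with hp
  have hnodup : ((PySem.List.pyRange 0 (w : Int) 1).reverse).Nodup := by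
    rw [PySem.List.pyRange_zero_natCast]
    exact List.nodup_reverse.mpr (List.nodup_range.map Nat.cast_injective)
  have hmem : ∀ j ∈ (PySem.List.pyRange 0 (w : Int) 1).reverse, 0 ≤ j ∧ j.toNat < w := by
    intro j hj
    rw [List.mem_reverse, PySem.List.mem_pyRange_one] at hj
    omega
  have hstart : u = u.map (pvRestar []) := by
    conv_lhs => rw [← List.map_id u]
    exact List.map_congr_left (fun row _ => (restar_nil row).symm)
  calc ((PySem.List.pyRange 0 (w : Int) 1).reverse).foldl _ u
      = ((PySem.List.pyRange 0 (w : Int) 1).reverse).foldl _ (u.map (pvRestar [])) := by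
        rw [← hstart]
    _ = u.map (pvRestar ([] ++ ((PySem.List.pyRange 0 (w : Int) 1).reverse).filter p)) :=
        loop_invariant u _ [] hmem (by simp) hnodup hrows
    _ = u.map (pvRestar ((PySem.List.pyRange 0 (w : Int) 1).filter p)) := by
        apply List.map_congr_left
        intro row _
        apply restar_congr
        intro j
        simp [List.filter_reverse]
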